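-- pv_equiv track=rewrite | github.com/Benjamin-van-Heerden/Python | google_foobar/level5/test.py | find_cardinality
-- ===== SOURCE A (Python) =====
-- from math import perm, comb
--
-- def find_cardinality(partition, num_colors):
--     full_length = len(partition)
--     truncated_length = len(set(partition))
--     if full_length == truncated_length:
--         return perm(num_colors, full_length)
--     else:
--         counts = {}
--         for n in partition:
--             if n in counts:
--                 counts[n] += 1
--             else:
--                 counts[n] = 1
--
--         temp_total = num_colors
--         result = 1
--         for val in counts.values():
--             result *= comb(temp_total, val)
--             temp_total -= val
--         return result
-- ===== SOURCE B (Python) =====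
-- from math import perm, factorial
--
-- def find_cardinality(partition, num_colors):
--     counts = {}
--     for n in partition:
--         counts[n] = counts.get(n, 0) + 1
--     denom = 1
--     for c in counts.values():
--         denom *= factorial(c)
--     return perm(num_colors, len(partition)) // denom
-- ===== Notes on version B (the rewrite author's own statement) =====
-- stated objective: simpler
-- what changed: Replaces A's all-distinct special case plus telescoping product of binomials over a shrinking color pool by the single multinomial closed form perm(num_colors, len(partition)) // product of factorials of the multiplicities, which subsumes the distinct case.
import Mathlib
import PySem

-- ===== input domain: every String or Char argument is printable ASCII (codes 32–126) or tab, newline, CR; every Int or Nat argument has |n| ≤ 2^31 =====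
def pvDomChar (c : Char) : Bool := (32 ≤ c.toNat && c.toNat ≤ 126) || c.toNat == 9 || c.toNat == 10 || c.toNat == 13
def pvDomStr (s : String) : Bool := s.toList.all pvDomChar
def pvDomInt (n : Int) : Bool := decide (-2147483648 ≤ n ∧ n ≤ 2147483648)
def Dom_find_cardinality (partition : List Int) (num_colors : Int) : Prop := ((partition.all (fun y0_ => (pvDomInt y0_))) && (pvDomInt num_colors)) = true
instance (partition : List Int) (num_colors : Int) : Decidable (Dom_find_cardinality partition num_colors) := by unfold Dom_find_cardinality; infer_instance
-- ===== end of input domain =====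

-- B replaces A's all-distinct special case and telescoping binomial product by the single
-- multinomial closed form perm(num_colors, n) // prod of factorials of the multiplicities (objective: simpler).

-- ===== PORT A =====
-- math.comb n k: exact where Python returns; Python raises ValueError on negative arguments (excluded by Pre_)
def pyComb (n k : Int) : Int := if 0 ≤ n ∧ 0 ≤ k then ((n.toNat.choose k.toNat : Nat) : Int) else 0
-- math.perm n k: exact where Python returns; Python raises ValueError on negative arguments (excluded by Pre_)
def pyPerm (n k : Int) : Int := if 0 ≤ n ∧ 0 ≤ k then ((n.toNat.descFactorial k.toNat : Nat) : Int) else 0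

def find_cardinality (partition : List Int) (num_colors : Int) : Int :=
  let full_length : Int := partition.length
  let truncated_length : Int := (PySem.Set.ofList partition).length
  if full_length = truncated_length then
    pyPerm num_colors full_length
  else
    let counts : PySem.Dict Int Int :=
      partition.foldl (fun counts n =>
        if counts.contains n then counts.insert n (counts.getD n 0 + 1)
        else counts.insert n 1) PySem.Dict.empty
    let st := (PySem.Dict.values counts).foldl
      (fun (st : Int × Int) val => (st.1 - val, st.2 * pyComb st.1 val)) (num_colors, 1)
    st.2

-- ===== PORT B =====
-- math.factorial c: exact where Python returns; raises on negative c (never reached: counts are ≥ 1)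
def pyFactorial (c : Int) : Int := if 0 ≤ c then ((c.toNat.factorial : Nat) : Int) else 0

def find_cardinality_alt (partition : List Int) (num_colors : Int) : Int :=
  let counts : PySem.Dict Int Int :=
    partition.foldl (fun counts n => counts.insert n (counts.getD n 0 + 1)) PySem.Dict.empty
  let denom := (PySem.Dict.values counts).foldl (fun acc c => acc * pyFactorial c) 1
  PySem.Int.floordiv (pyPerm num_colors partition.length) denom

-- ===== PRECONDITION & SPEC =====
-- Pre_ excludes exactly the inputs on which A raises ValueError: num_colors < 0 (math.perm/comb reject it),
-- and repeated-element partitions whose length exceeds num_colors plus the multiplicity of the last distinct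
-- element, where A's shrinking pool temp_total goes negative before the last comb call.
def Pre_find_cardinality (partition : List Int) (num_colors : Int) : Prop :=
  0 ≤ num_colors ∧ (partition.Nodup ∨
    (partition.length : Int) ≤ num_colors + partition.count (((PySem.Set.ofList partition).getLast?).getD 0))
instance (partition : List Int) (num_colors : Int) : Decidable (Pre_find_cardinality partition num_colors) := by unfold Pre_find_cardinality; infer_instance

def pvWitness_find_cardinality : List Int × Int := ([1, 1, 2], 3)

def Spec_find_cardinality (partition : List Int) (num_colors : Int) (out : Int) : Prop := out = find_cardinality_alt partition num_colors
instance (partition : List Int) (num_colors : Int) (out : Int) : Decidable (Spec_find_cardinality partition num_colors out) := by unfold Spec_find_cardinality; infer_instance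

-- ===== CLAIM (what is proved, stated in full; the proofs are below) =====
def Claim_equal_find_cardinality : Prop := ∀ (partition : List Int) (num_colors : Int), Dom_find_cardinality partition num_colors → Pre_find_cardinality partition num_colors → Spec_find_cardinality partition num_colors (find_cardinality partition num_colors)

-- ===== LEMMAS AND PROOFS =====

-- A's counting loop builds exactly Counter(partition)
lemma countFold_eq_counter (p : List Int) :
    p.foldl (fun counts n =>
        if counts.contains n then counts.insert n (counts.getD n 0 + 1)
        else counts.insert n 1) PySem.Dict.empty = PySem.Dict.counter p := by
  have hfun : (fun (counts : PySem.Dict Int Int) n =>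
      if counts.contains n then counts.insert n (counts.getD n 0 + 1)
      else counts.insert n 1)
      = (fun counts n => counts.insert n (counts.getD n 0 + 1)) := by
    funext d n
    by_cases h : d.contains n
    · simp [h]
    · rw [PySem.Dict.getD_of_not_contains d 0 (by simpa using h)]
      simp [h]
  rw [hfun, PySem.Dict.foldl_insert_getD_add_one_eq_counter]

lemma values_counter (p : List Int) :
    PySem.Dict.values (PySem.Dict.counter p)
      = (PySem.Set.ofList p).map (fun k => ((p.count k : Int))) := by
  simp [PySem.Dict.values, PySem.Dict.items_counter]

-- multiplicities over the distinct values sum to the length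
lemma sum_counts_eq_length (p : List Int) :
    ((PySem.Set.ofList p).map (fun k => p.count k)).sum = p.length := by
  have hperm : (PySem.Set.ofList p).Perm p.dedup := by
    refine (List.perm_ext_iff_of_nodup (PySem.Set.nodup_ofList p) p.nodup_dedup).mpr ?_
    intro a; simp [PySem.Set.mem_ofList, List.mem_dedup]
  calc ((PySem.Set.ofList p).map (fun k => p.count k)).sum
      = (p.dedup.map (fun k => p.count k)).sum := (hperm.map _).sum_eq
    _ = p.length := List.sum_map_count_dedup_eq_length p

-- length equality with the dedup means Nodup
lemma nodup_of_length_ofList (p : List Int)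
    (h : (PySem.Set.ofList p).length = p.length) : p.Nodup := by
  have hperm : (PySem.Set.ofList p).Perm p.dedup := by
    refine (List.perm_ext_iff_of_nodup (PySem.Set.nodup_ofList p) p.nodup_dedup).mpr ?_
    intro a; simp [PySem.Set.mem_ofList, List.mem_dedup]
  have hlen : p.dedup.length = p.length := by rw [← hperm.length_eq]; exact h
  have : p.dedup = p := (List.dedup_sublist p).eq_of_length hlen
  rw [← this]; exact p.nodup_dedup

-- the residual form of A's loop
def Floop : Int → List Int → Int
  | _, [] => 1
  | N, c :: cs => pyComb N c * Floop (N - c) cs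

lemma loop_eq (cs : List Int) : ∀ (N r : Int),
    (cs.foldl (fun (st : Int × Int) val => (st.1 - val, st.2 * pyComb st.1 val)) (N, r)).2
      = r * Floop N cs := by
  induction cs with
  | nil => intro N r; simp [Floop]
  | cons c cs ih => intro N r; simp [Floop, ih, mul_assoc]

lemma denom_eq (cs : List Int) : ∀ (r : Int),
    cs.foldl (fun acc c => acc * pyFactorial c) r = r * (cs.map pyFactorial).prod := by
  induction cs with
  | nil => intro r; simp
  | cons c cs ih => intro r; simp [ih, mul_assoc]

lemma desc_add (m N c : ℕ) :
    N.descFactorial (c + m) = N.descFactorial c * (N - c).descFactorial m := by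
  induction m with
  | zero => simp
  | succ m ih =>
      have h1 : c + (m + 1) = (c + m) + 1 := by omega
      rw [h1, Nat.descFactorial_succ, ih, Nat.descFactorial_succ]
      have h2 : N - (c + m) = N - c - m := by omega
      rw [h2]; ring

lemma fact_comb_eq_perm (N c : Int) (hN : 0 ≤ N) (hc : 0 ≤ c) :
    pyFactorial c * pyComb N c = pyPerm N c := by
  simp only [pyFactorial, pyComb, pyPerm, if_pos hc, if_pos (And.intro hN hc)]
  rw [← Nat.cast_mul, ← Nat.descFactorial_eq_factorial_mul_choose]

lemma perm_mul_perm (N c s : Int) (hN : 0 ≤ N) (hc : 0 ≤ c) (hs : 0 ≤ s) (hNc : 0 ≤ N - c) :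
    pyPerm N c * pyPerm (N - c) s = pyPerm N (c + s) := by
  simp only [pyPerm, if_pos (And.intro hN hc), if_pos (And.intro hNc hs),
    if_pos (And.intro hN (by omega : (0:Int) ≤ c + s))]
  rw [← Nat.cast_mul]
  have h1 : (c + s).toNat = c.toNat + s.toNat := by omega
  have h2 : (N - c).toNat = N.toNat - c.toNat := by omega
  rw [h1, h2, desc_add s.toNat N.toNat c.toNat]

-- the multinomial identity: factorials of the block sizes times A's telescoping binomial
-- product is the falling factorial, whenever every pool A looks at is nonnegative
lemma main_identity (cs : List Int) : ∀ (N : Int), 0 ≤ N → (∀ c ∈ cs, 1 ≤ c) →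
    (∀ i : ℕ, i + 1 ≤ cs.length → (cs.take i).sum ≤ N) →
    (cs.map pyFactorial).prod * Floop N cs = pyPerm N cs.sum := by
  induction cs with
  | nil => intro N hN _ _; simp [Floop, pyPerm, hN]
  | cons c cs ih =>
      intro N hN hpos hpre
      have hc : 1 ≤ c := hpos c (by simp)
      have hs : 0 ≤ cs.sum := List.sum_nonneg (fun x hx => le_trans (by norm_num) (hpos x (by simp [hx])))
      rcases List.eq_nil_or_concat cs with hnil | ⟨_, _, hne⟩
      · subst hnil
        simp only [List.map_cons, List.map_nil, List.prod_cons, List.prod_nil, mul_one,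
          Floop, List.sum_cons, List.sum_nil, add_zero]
        exact fact_comb_eq_perm N c hN (by omega)
      · have hcs_ne : cs ≠ [] := by rw [hne]; simp
        have hcN : c ≤ N := by
          have hl : 1 ≤ cs.length := List.length_pos_iff.mpr hcs_ne
          have := hpre 1 (by simp; omega)
          simpa using this
        have hpre' : ∀ i : ℕ, i + 1 ≤ cs.length → (cs.take i).sum ≤ N - c := by
          intro i hi
          have := hpre (i + 1) (by simp; omega)
          simp only [List.take_succ_cons, List.sum_cons] at this
          omega
        have hih := ih (N - c) (by omega) (fun x hx => hpos x (by simp [hx])) hpre'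
        simp only [List.map_cons, List.prod_cons, Floop, List.sum_cons]
        calc pyFactorial c * (cs.map pyFactorial).prod * (pyComb N c * Floop (N - c) cs)
            = (pyFactorial c * pyComb N c) * ((cs.map pyFactorial).prod * Floop (N - c) cs) := by ring
          _ = pyPerm N c * pyPerm (N - c) cs.sum := by rw [fact_comb_eq_perm N c hN (by omega), hih]
          _ = pyPerm N (c + cs.sum) := perm_mul_perm N c cs.sum hN (by omega) hs (by omega)

-- prefix sums of a nonnegative list are bounded by the total minus the last entry
lemma take_sum_le (cs : List Int) (hpos : ∀ c ∈ cs, 0 ≤ c) (hne : cs ≠ [])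
    (i : ℕ) (hi : i + 1 ≤ cs.length) : (cs.take i).sum + cs.getLast hne ≤ cs.sum := by
  have hsplit : cs.take i ++ cs.drop i = cs := List.take_append_drop i cs
  have hdrop_ne : cs.drop i ≠ [] := by
    intro h
    have := List.length_drop (l := cs) (i := i)
    rw [h] at this; simp at this; omega
  have hlast : (cs.drop i).getLast hdrop_ne = cs.getLast hne := by
    have := List.getLast_append_of_ne_nil (l := cs.take i) (l' := cs.drop i)
      (by rw [hsplit]; exact hne) hdrop_ne
    rw [← this]
    congr 1
  have hdl : (cs.drop i).dropLast ++ [(cs.drop i).getLast hdrop_ne] = cs.drop i :=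
    List.dropLast_append_getLast hdrop_ne
  have hsum_drop : (cs.drop i).getLast hdrop_ne ≤ (cs.drop i).sum := by
    conv_rhs => rw [← hdl]
    rw [List.sum_append]
    have : 0 ≤ (cs.drop i).dropLast.sum := by
      refine List.sum_nonneg (fun x hx => hpos x ?_)
      exact List.mem_of_mem_drop (List.mem_of_mem_dropLast hx)
    simp; omega
  have hsum : cs.sum = (cs.take i).sum + (cs.drop i).sum := by
    conv_lhs => rw [← hsplit]
    rw [List.sum_append]
  rw [hsum, ← hlast]; omega

-- ===== VERDICT (by name: the statement is the Claim_ definition above) =====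
theorem find_cardinality_spec : Claim_equal_find_cardinality := by
  intro p N _ hpre
  obtain ⟨hN, hpre2⟩ := hpre
  unfold Spec_find_cardinality find_cardinality find_cardinality_alt
  simp only [countFold_eq_counter, PySem.Dict.foldl_insert_getD_add_one_eq_counter,
    values_counter, denom_eq, one_mul]
  set S : List Int := PySem.Set.ofList p with hS
  set cs : List Int := S.map (fun k => ((p.count k : Int))) with hcs
  have hsum : cs.sum = (p.length : Int) := by
    have h1 : cs = List.map Nat.cast (S.map (fun k => p.count k)) := by
      rw [hcs, List.map_map]; rfl
    rw [h1, ← Nat.cast_list_sum, sum_counts_eq_length]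
  have hpos : ∀ c ∈ cs, 1 ≤ c := by
    intro c hcmem
    rw [hcs] at hcmem
    obtain ⟨k, hk, rfl⟩ := List.mem_map.mp hcmem
    have : k ∈ p := (PySem.Set.mem_ofList _ _).mp hk
    have := List.count_pos_iff.mpr this
    omega
  by_cases hlen : (p.length : Int) = (S.length : Int)
  · -- all elements distinct: every count is 1, so B's denominator is 1
    rw [if_pos hlen]
    have hnodup : p.Nodup := nodup_of_length_ofList p (by exact_mod_cast hlen.symm)
    have hden1 : (cs.map pyFactorial).prod = 1 := by
      refine List.prod_eq_one ?_
      intro x hx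
      obtain ⟨c, hcmem, rfl⟩ := List.mem_map.mp hx
      rw [hcs] at hcmem
      obtain ⟨k, hk, rfl⟩ := List.mem_map.mp hcmem
      have h1 : p.count k = 1 :=
        List.count_eq_one_of_mem hnodup ((PySem.Set.mem_ofList _ _).mp hk)
      simp [h1, pyFactorial]
    rw [hden1, PySem.Int.floordiv_eq_ediv_of_pos (by norm_num), Int.ediv_one]
  · -- repeated elements: the telescoping product equals perm // prod of factorials
    rw [if_neg hlen]
    have hnotnodup : ¬ p.Nodup := by
      intro hnd
      exact hlen (by rw [hS, PySem.Set.ofList_eq_self_of_nodup p hnd])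
    have hbound := hpre2.resolve_left hnotnodup
    have hp_ne : p ≠ [] := by rintro rfl; exact hnotnodup List.nodup_nil
    have hS_ne : S ≠ [] := by
      rw [hS]; intro h
      have : (p.getLast hp_ne) ∈ PySem.Set.ofList p :=
        (PySem.Set.mem_ofList _ _).mpr (List.getLast_mem hp_ne)
      rw [h] at this; simp at this
    have hcs_ne : cs ≠ [] := by rw [hcs]; simp [hS_ne]
    have hlast : cs.getLast hcs_ne = (p.count (S.getLast?.getD 0) : Int) := by
      have h1 : cs.getLast? = S.getLast?.map (fun k => ((p.count k : Int))) := by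
        rw [hcs]; exact List.getLast?_map
      have h2 : cs.getLast? = some (cs.getLast hcs_ne) := List.getLast?_eq_some_getLast hcs_ne
      have h3 : S.getLast? = some (S.getLast hS_ne) := List.getLast?_eq_some_getLast hS_ne
      rw [h3] at h1
      rw [h2] at h1
      simp only [Option.map_some] at h1
      rw [Option.some_inj.mp h1, h3]; simp
    have hpre_sum : ∀ i : ℕ, i + 1 ≤ cs.length → (cs.take i).sum ≤ N := by
      intro i hi
      have htk := take_sum_le cs (fun c hc => le_trans (by norm_num) (hpos c hc)) hcs_ne i hi
      rw [hsum, hlast] at htk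
      omega
    have hmain := main_identity cs N hN hpos hpre_sum
    rw [hsum] at hmain
    rw [loop_eq cs N 1, one_mul]
    have hdpos : 0 < (cs.map pyFactorial).prod := by
      refine List.prod_pos ?_
      intro x hx
      obtain ⟨c, hcmem, rfl⟩ := List.mem_map.mp hx
      have h1 : 1 ≤ c := hpos c hcmem
      simp only [pyFactorial, if_pos (by omega : (0:Int) ≤ c)]
      exact_mod_cast Nat.factorial_pos c.toNat
    rw [← hmain, PySem.Int.floordiv_eq_ediv_of_pos hdpos,
      Int.mul_ediv_cancel_left _ (ne_of_gt hdpos)]
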